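-- pv_equiv track=rewrite | github.com/One-Bridge/foundry-testing-mcp | components/testing_prompts.py | _extract_key_sections
-- ===== SOURCE A (Python) =====
-- def _extract_key_sections(content: str) -> str:
--     """Extract key sections from security guidance for system prompt."""
--     key_sections = [
--         "## AI IDENTITY AND EXPERTISE",
--         "## CORE SECURITY AUDIT METHODOLOGY",
--         "## AI CODING AGENT FAILURE PATTERNS",
--         "## VULNERABILITY PATTERNS TO TEST"
--     ]
--
--     extracted = []
--     lines = content.split('\n')
--     current_section = None
--     include_section = False
--
--     for line in lines:
--         # Check if this line starts a section we want
--         if any(section in line for section in key_sections):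
--             current_section = line
--             include_section = True
--             extracted.append(line)
--         # Check if this line starts a different section (stop including)
--         elif line.startswith("## ") and include_section:
--             if not any(section in line for section in key_sections):
--                 include_section = False
--                 current_section = None
--             else:
--                 # This is another section we want
--                 extracted.append(line)
--         # Include lines if we're in a relevant section
--         elif include_section:
--             extracted.append(line)
--
--     # Limit to reasonable size for system prompt
--     result = '\n'.join(extracted)
--     return result[:4000] if len(result) > 4000 else result
-- ===== SOURCE B (Python) =====
-- def _extract_key_sections(content: str) -> str:
--     """Extract key sections from security guidance for system prompt."""
--     key_sections = [
--         "## AI IDENTITY AND EXPERTISE",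
--         "## CORE SECURITY AUDIT METHODOLOGY",
--         "## AI CODING AGENT FAILURE PATTERNS",
--         "## VULNERABILITY PATTERNS TO TEST"
--     ]
--
--     def is_key(line):
--         return any(section in line for section in key_sections)
--
--     def is_header(line):
--         return line.startswith("## ") or is_key(line)
--
--     # Build consecutive segments: each segment is a header-like line plus the
--     # run of non-header lines after it; lines before the first header are dropped.
--     lines = content.split('\n')
--     n = len(lines)
--     segments = []
--     i = 0
--     while i < n:
--         if is_header(lines[i]):
--             j = i + 1
--             while j < n and not is_header(lines[j]):
--                 j += 1
--             segments.append(lines[i:j])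
--             i = j
--         else:
--             i += 1
--
--     kept = [line for seg in segments if is_key(seg[0]) for line in seg]
--     result = '\n'.join(kept)
--     return result[:4000]
-- ===== Notes on version B (the rewrite author's own statement) =====
-- stated objective: alternative
-- what changed: Replaces A's single stateful scan with an include_section flag by an explicit two-phase decomposition: first split the lines into consecutive segments starting at every header-like line (startswith('## ') or containing a key header), then keep exactly the segments whose leading line contains a key header and join them.
import Mathlib
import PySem

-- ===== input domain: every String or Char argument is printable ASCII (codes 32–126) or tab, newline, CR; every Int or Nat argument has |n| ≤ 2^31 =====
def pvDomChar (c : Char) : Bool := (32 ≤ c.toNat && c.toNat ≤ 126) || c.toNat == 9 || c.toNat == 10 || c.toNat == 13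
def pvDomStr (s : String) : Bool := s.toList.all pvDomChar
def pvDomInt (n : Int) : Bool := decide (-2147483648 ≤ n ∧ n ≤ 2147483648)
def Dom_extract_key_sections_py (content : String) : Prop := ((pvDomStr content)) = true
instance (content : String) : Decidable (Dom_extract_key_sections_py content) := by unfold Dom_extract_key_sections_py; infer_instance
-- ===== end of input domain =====

-- B replaces A's stateful include/exclude flag scan by an explicit build-segments-then-filter
-- decomposition (objective: alternative, same cost).

-- shared literal constants (the four key section headers, identical in A and B)
def pvKeys : List String :=
  ["## AI IDENTITY AND EXPERTISE",
   "## CORE SECURITY AUDIT METHODOLOGY",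
   "## AI CODING AGENT FAILURE PATTERNS",
   "## VULNERABILITY PATTERNS TO TEST"]

-- any(section in line for section in key_sections)
def pvIsKey (line : String) : Bool := pvKeys.any (fun k => PySem.Str.isIn k line)

-- ===== PORT A =====
-- the for-loop over lines with the include_section flag; the dead variable
-- current_section is written but never read by A, so it is not carried here
def pvLoopA : List String → List String → Bool → List String
  | [], extracted, _ => extracted
  | line :: ls, extracted, inc =>
    if pvIsKey line then pvLoopA ls (extracted ++ [line]) true
    else if PySem.Str.startswith line "## " && inc then
      (if !pvIsKey line then pvLoopA ls extracted false
       else pvLoopA ls (extracted ++ [line]) inc)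
    else if inc then pvLoopA ls (extracted ++ [line]) inc
    else pvLoopA ls extracted inc

def extract_key_sections_py (content : String) : String :=
  let lines := (PySem.Str.split? content "\n").getD []  -- sep "\n" ≠ "", so split? is some
  let extracted := pvLoopA lines [] false
  let result := PySem.Str.join "\n" extracted
  if PySem.Str.len result > 4000 then PySem.Str.slice result none (some 4000) else result

-- ===== PORT B =====
def pvIsHeader (line : String) : Bool := PySem.Str.startswith line "## " || pvIsKey line

-- Source B's outer while loop: skip non-header lines, at a header take the run of
-- following non-header lines as one segment (the inner while loop), continue after it
def pvSegs : List String → List (List String)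
  | [] => []
  | line :: ls =>
    if pvIsHeader line then
      (line :: ls.takeWhile (fun x => !pvIsHeader x)) ::
        pvSegs (ls.dropWhile (fun x => !pvIsHeader x))
    else pvSegs ls
termination_by ls => ls.length
decreasing_by
  · have := List.length_dropWhile_le (fun x => !pvIsHeader x) ls
    simp; omega
  · simp

def extract_key_sections_py_alt (content : String) : String :=
  let lines := (PySem.Str.split? content "\n").getD []  -- sep "\n" ≠ "", so split? is some
  let kept := ((pvSegs lines).filter (fun seg => pvIsKey (seg.headD ""))).flatten
  let result := PySem.Str.join "\n" kept
  PySem.Str.slice result none (some 4000)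

-- ===== PRECONDITION & SPEC =====
def Spec_extract_key_sections_py (content : String) (out : String) : Prop := out = extract_key_sections_py_alt content
instance (content : String) (out : String) : Decidable (Spec_extract_key_sections_py content out) := by unfold Spec_extract_key_sections_py; infer_instance

-- ===== CLAIM (what is proved, stated in full; the proofs are below) =====
def Claim_equal_extract_key_sections_py : Prop := ∀ (content : String), Dom_extract_key_sections_py content → Spec_extract_key_sections_py content (extract_key_sections_py content)

-- ===== LEMMAS AND PROOFS =====

-- A's loop with the accumulator factored out
def pvF : List String → Bool → List String
  | [], _ => []
  | line :: ls, inc =>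
    if pvIsKey line then line :: pvF ls true
    else if PySem.Str.startswith line "## " && inc then
      (if !pvIsKey line then pvF ls false else line :: pvF ls inc)
    else if inc then line :: pvF ls inc
    else pvF ls inc

theorem pvLoopA_eq (ls : List String) : ∀ (acc : List String) (inc : Bool),
    pvLoopA ls acc inc = acc ++ pvF ls inc := by
  induction ls with
  | nil => intro acc inc; simp [pvLoopA, pvF]
  | cons l ls ih =>
    intro acc inc
    simp only [pvLoopA, pvF]
    split_ifs <;> simp [ih]

-- B's kept-lines-of-segments as a single function of the line list
def pvG (ls : List String) : List String :=
  ((pvSegs ls).filter (fun seg => pvIsKey (seg.headD ""))).flatten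

theorem pvSegs_cons_header (l : String) (ls : List String) (h : pvIsHeader l = true) :
    pvSegs (l :: ls) = (l :: ls.takeWhile (fun x => !pvIsHeader x)) ::
      pvSegs (ls.dropWhile (fun x => !pvIsHeader x)) := by
  rw [pvSegs]; simp [h]

theorem pvSegs_cons_skip (l : String) (ls : List String) (h : pvIsHeader l = false) :
    pvSegs (l :: ls) = pvSegs ls := by
  rw [pvSegs]; simp [h]

theorem pvG_dropWhile (ls : List String) :
    pvG (ls.dropWhile (fun x => !pvIsHeader x)) = pvG ls := by
  induction ls with
  | nil => rfl
  | cons l ls ih =>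
    cases h : pvIsHeader l with
    | true => simp [List.dropWhile, h]
    | false =>
      rw [List.dropWhile_cons_of_pos (by simp [h]), ih]
      unfold pvG
      rw [pvSegs_cons_skip l ls h]

theorem pvF_eq_pvG (ls : List String) :
    pvF ls false = pvG ls ∧
    pvF ls true = ls.takeWhile (fun x => !pvIsHeader x) ++
      pvG (ls.dropWhile (fun x => !pvIsHeader x)) := by
  induction ls with
  | nil =>
    constructor <;> simp [pvF, pvG, pvSegs]
  | cons l ls ih =>
    cases hk : pvIsKey l with
    | true =>
      have hh : pvIsHeader l = true := by unfold pvIsHeader; rw [hk, Bool.or_true]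
      have hseg : pvG (l :: ls) =
          l :: (ls.takeWhile (fun x => !pvIsHeader x) ++
            pvG (ls.dropWhile (fun x => !pvIsHeader x))) := by
        unfold pvG
        rw [pvSegs_cons_header l ls hh]
        simp [hk]
      constructor
      · simp only [pvF, hk, if_pos, ih.2, hseg]
      · simp only [pvF, hk, if_pos, ih.2]
        rw [List.takeWhile_cons_of_neg (by simp [hh]),
            List.dropWhile_cons_of_neg (by simp [hh]), hseg]
        simp
    | false =>
      cases hs : PySem.Str.startswith l "## " with
      | true =>
        have hh : pvIsHeader l = true := by unfold pvIsHeader; rw [hs, Bool.true_or]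
        have hseg : pvG (l :: ls) = pvG ls := by
          unfold pvG
          rw [pvSegs_cons_header l ls hh]
          rw [List.filter_cons_of_neg (by simp [hk])]
          exact pvG_dropWhile ls
        constructor
        · simp only [pvF, hk, hs, Bool.false_eq_true, if_false, Bool.and_false]
          rw [ih.1, hseg]
        · simp only [pvF, hk, hs, Bool.false_eq_true, if_false, Bool.and_true, if_true]
          rw [List.takeWhile_cons_of_neg (by simp [hh]),
              List.dropWhile_cons_of_neg (by simp [hh]), hseg, ih.1]
          simp
      | false =>
        have hh : pvIsHeader l = false := by unfold pvIsHeader; rw [hs, hk]; rfl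
        have hseg : pvG (l :: ls) = pvG ls := by
          unfold pvG; rw [pvSegs_cons_skip l ls hh]
        constructor
        · simp only [pvF, hk, hs, Bool.false_eq_true, if_false, Bool.false_and]
          rw [ih.1, hseg]
        · simp only [pvF, hk, hs, Bool.false_eq_true, if_false, Bool.false_and, if_true]
          rw [List.takeWhile_cons_of_pos (by simp [hh]),
              List.dropWhile_cons_of_pos (by simp [hh]), ih.2]
          simp

-- slicing to 4000 is the identity on a string of length ≤ 4000
theorem pvSlice_of_le (r : String) (h : ¬ PySem.Str.len r > 4000) :
    PySem.Str.slice r none (some 4000) = r := by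
  apply String.toList_inj.mp
  rw [PySem.Str.toList_slice]
  have hl : r.toList.length ≤ 4000 := by
    have := PySem.Str.len_eq r; omega
  show PySem.List.slice r.toList none (some 4000) = r.toList
  rw [PySem.List.slice_to (b := 4000) r.toList (by norm_num),
      show (4000 : Int).toNat = 4000 from rfl, List.take_of_length_le hl]

-- ===== VERDICT (by name: the statement is the Claim_ definition above) =====
theorem extract_key_sections_py_spec : Claim_equal_extract_key_sections_py := by
  intro content _
  unfold Spec_extract_key_sections_py extract_key_sections_py extract_key_sections_py_alt
  simp only [pvLoopA_eq, List.nil_append, (pvF_eq_pvG _).1, pvG]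
  split_ifs with h
  · rfl
  · exact (pvSlice_of_le _ h).symm
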